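-- pv_equiv track=rewrite | github.com/shaaker-ma/LeetCode | list_idx_between_targets.py | func
-- ===== SOURCE A (Python) =====
-- def func(arr, target, x):
--     first_idx, second_idx = 0, len(arr)-1
--     while(first_idx <= second_idx):
--         current_middle = (first_idx + second_idx) // 2
--         if(arr[current_middle] < target):
--             first_idx = current_middle+1
--         elif(target < arr[current_middle]):
--             second_idx = current_middle-1
--         elif(target == arr[current_middle]):
--             return arr[current_middle-x:current_middle]
-- ===== SOURCE B (Python) =====
-- def func(arr, target, x):
--     def find(lo, hi):
--         if hi < lo:
--             return None
--         mid = (lo + hi) // 2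
--         v = arr[mid]
--         if v == target:
--             return mid
--         return find(mid + 1, hi) if v < target else find(lo, mid - 1)
--
--     i = find(0, len(arr) - 1)
--     return None if i is None else arr[i - x:i]
-- ===== Notes on version B (the rewrite author's own statement) =====
-- stated objective: alternative
-- what changed: The search is separated from the slicing: a recursive helper returns only the found INDEX (checking equality first and picking a branch by comparison), and the slice arr[i-x:i] is computed once at top level from that optional index, instead of A's iterative while-loop with two mutable bounds that slices inline in its elif chain.
import Mathlib
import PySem

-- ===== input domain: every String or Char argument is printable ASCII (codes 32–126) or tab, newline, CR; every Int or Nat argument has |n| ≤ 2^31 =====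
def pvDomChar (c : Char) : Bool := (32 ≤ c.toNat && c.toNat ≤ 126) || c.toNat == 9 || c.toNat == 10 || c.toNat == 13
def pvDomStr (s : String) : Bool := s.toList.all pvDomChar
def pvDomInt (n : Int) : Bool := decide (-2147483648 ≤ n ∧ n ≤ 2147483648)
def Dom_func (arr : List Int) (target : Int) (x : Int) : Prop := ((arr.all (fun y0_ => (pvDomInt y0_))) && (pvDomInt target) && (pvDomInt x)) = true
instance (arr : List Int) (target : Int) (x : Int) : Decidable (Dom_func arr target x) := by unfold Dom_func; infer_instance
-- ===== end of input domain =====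

-- B separates search from slicing: a recursive helper returns the found index (equality tested first), and the slice is taken once at top level; same search path, so values coincide.

-- ===== PORT A =====
-- the while loop of A: state is the pair (first_idx, second_idx)
def funcLoop (arr : List Int) (target : Int) (x : Int) (first_idx : Int) (second_idx : Int) : Option (List Int) :=
  if h : first_idx ≤ second_idx then
    let current_middle := PySem.Int.floordiv (first_idx + second_idx) 2
    match PySem.List.pyGet? arr current_middle with
    | none => none  -- IndexError (never reached from func's initial call)
    | some v =>
      if v < target then funcLoop arr target x (current_middle + 1) second_idx
      else if target < v then funcLoop arr target x first_idx (current_middle - 1)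
      else if target == v then some (PySem.List.slice arr (some (current_middle - x)) (some current_middle))
      else none  -- dead branch: by trichotomy the elif chain always fires (Python would loop forever here, but it cannot happen)
  else none  -- loop exits, function falls off the end: None
termination_by (second_idx + 1 - first_idx).toNat
decreasing_by
  · have := PySem.Int.floordiv_two_mid_bounds h; omega
  · have := PySem.Int.floordiv_two_mid_bounds h; omega

def func (arr : List Int) (target : Int) (x : Int) : Option (List Int) :=
  funcLoop arr target x 0 ((arr.length : Int) - 1)

-- ===== PORT B =====
-- B's recursive helper find(lo, hi): returns only the index of the hit
def funcFind (arr : List Int) (target : Int) (lo : Int) (hi : Int) : Option Int :=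
  if hgt : hi < lo then none
  else
    let mid := PySem.Int.floordiv (lo + hi) 2
    match PySem.List.pyGet? arr mid with
    | none => none  -- IndexError (never reached from func_alt's initial call)
    | some v =>
      if v == target then some mid
      else if v < target then funcFind arr target (mid + 1) hi
      else funcFind arr target lo (mid - 1)
termination_by (hi + 1 - lo).toNat
decreasing_by
  · have := PySem.Int.floordiv_two_mid_bounds (show lo ≤ hi by omega); omega
  · have := PySem.Int.floordiv_two_mid_bounds (show lo ≤ hi by omega); omega

def func_alt (arr : List Int) (target : Int) (x : Int) : Option (List Int) :=
  match funcFind arr target 0 ((arr.length : Int) - 1) with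
  | none => none
  | some i => some (PySem.List.slice arr (some (i - x)) (some i))

-- ===== PRECONDITION & SPEC =====
def Spec_func (arr : List Int) (target : Int) (x : Int) (out : Option (List Int)) : Prop := out = func_alt arr target x
instance (arr : List Int) (target : Int) (x : Int) (out : Option (List Int)) : Decidable (Spec_func arr target x out) := by unfold Spec_func; infer_instance

-- ===== CLAIM (what is proved, stated in full; the proofs are below) =====
def Claim_equal_func : Prop := ∀ (arr : List Int) (target : Int) (x : Int), Dom_func arr target x → Spec_func arr target x (func arr target x)

-- ===== LEMMAS AND PROOFS =====

theorem funcLoop_eq_find (arr : List Int) (target : Int) (x : Int) :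
    ∀ (lo hi : Int), funcLoop arr target x lo hi =
      (match funcFind arr target lo hi with
       | none => none
       | some i => some (PySem.List.slice arr (some (i - x)) (some i))) := by
  intro lo hi
  induction lo, hi using funcLoop.induct (arr := arr) (target := target) with
  | case1 lo hi h mid hget =>
      rw [funcLoop, funcFind]
      simp only [mid] at hget
      simp only [h, dif_pos, dif_neg (show ¬ hi < lo by omega), hget]
  | case2 lo hi h mid v hget hlt ih =>
      rw [funcLoop, funcFind]
      simp only [mid] at hget ih
      simp only [h, dif_pos, dif_neg (show ¬ hi < lo by omega), hget,
        if_neg (show ¬ (v == target) = true by simp; omega), if_pos hlt]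
      exact ih
  | case3 lo hi h mid v hget hlt hgt ih =>
      rw [funcLoop, funcFind]
      simp only [mid] at hget ih
      simp only [h, dif_pos, dif_neg (show ¬ hi < lo by omega), hget,
        if_neg (show ¬ (v == target) = true by simp; omega), if_neg hlt, if_pos hgt, if_neg hlt]
      exact ih
  | case4 lo hi h mid v hget hlt hgt heq =>
      rw [funcLoop, funcFind]
      simp only [mid] at hget
      simp only [h, dif_pos, dif_neg (show ¬ hi < lo by omega), hget,
        if_pos (show (v == target) = true by simp; omega), if_neg hlt, if_neg hgt, heq]
      simp
  | case5 lo hi h mid v hget hlt hgt hne =>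
      exact absurd (by simp [show target = v by omega]) hne
  | case6 lo hi h =>
      rw [funcLoop, funcFind]
      simp only [dif_neg h, dif_pos (show hi < lo by omega)]

-- ===== VERDICT (by name: the statement is the Claim_ definition above) =====
theorem func_spec : Claim_equal_func := by
  intro arr target x _
  unfold Spec_func func func_alt
  exact funcLoop_eq_find arr target x 0 ((arr.length : Int) - 1)
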